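-- pv_equiv track=rewrite | github.com/Kmathurin3/Group-Project-1-Movie- | src/movie_lib.py | parse_search_query
-- ===== SOURCE A (Python) =====
-- def parse_search_query(query):
--     """Take what the user types in and turn it into simple keywords."""
--     if not isinstance(query, str):
--         return []
--     query = query.lower()
--     words = ""
--     for ch in query:
--         if ch.isalnum() or ch.isspace():
--             words += ch
--         else:
--             words += " "
--     return words.split()
-- ===== SOURCE B (Python) =====
-- def parse_search_query(query):
--     """Take what the user types in and turn it into simple keywords."""
--     if not isinstance(query, str):
--         return []
--     out = []
--     buf = ""
--     for ch in query.lower():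
--         if ch.isalnum():
--             buf += ch
--         else:
--             if buf:
--                 out.append(buf)
--                 buf = ""
--     if buf:
--         out.append(buf)
--     return out
-- ===== Notes on version B (the rewrite author's own statement) =====
-- stated objective: alternative
-- what changed: Instead of building a cleaned copy of the string (replacing separators by spaces) and then calling .split(), B tokenizes in a single pass with a current-token buffer that is flushed to the result list at every non-alphanumeric character.
import Mathlib
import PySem

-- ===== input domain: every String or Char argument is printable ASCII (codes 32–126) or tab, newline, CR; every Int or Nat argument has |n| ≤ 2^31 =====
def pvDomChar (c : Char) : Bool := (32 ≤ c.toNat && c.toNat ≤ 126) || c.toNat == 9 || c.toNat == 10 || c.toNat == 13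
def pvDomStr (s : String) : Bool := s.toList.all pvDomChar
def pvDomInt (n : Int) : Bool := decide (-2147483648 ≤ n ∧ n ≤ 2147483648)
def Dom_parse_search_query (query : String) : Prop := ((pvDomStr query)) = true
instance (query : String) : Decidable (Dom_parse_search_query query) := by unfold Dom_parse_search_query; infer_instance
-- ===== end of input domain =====

-- B replaces A's clean-then-split() pipeline by a single-pass buffer tokenizer; same results, similar cost.


-- ===== PORT A =====
-- A: lowercase, build a cleaned string (non-alnum non-space characters become spaces), then .split()
def parse_search_query (query : String) : List String :=
  let q := PySem.Str.lower query
  let words : List Char := q.toList.foldl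
    (fun w ch =>
      if PySem.Chars.isalnum ch || PySem.Chars.isspace ch then w ++ [ch] else w ++ [' ']) []
  PySem.Str.split₀ (String.ofList words)

-- ===== PORT B =====
-- B: single pass, current-token buffer flushed at every non-alphanumeric character
def pvAltStep (st : List String × List Char) (ch : Char) : List String × List Char :=
  if PySem.Chars.isalnum ch then (st.1, st.2 ++ [ch])
  else if st.2.isEmpty then st else (st.1 ++ [String.ofList st.2], [])

def parse_search_query_alt (query : String) : List String :=
  let r := (PySem.Str.lower query).toList.foldl pvAltStep ([], [])
  if r.2.isEmpty then r.1 else r.1 ++ [String.ofList r.2]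

-- ===== PRECONDITION & SPEC =====
def Spec_parse_search_query (query : String) (out : List String) : Prop := out = parse_search_query_alt query
instance (query : String) (out : List String) : Decidable (Spec_parse_search_query query out) := by unfold Spec_parse_search_query; infer_instance

-- ===== CLAIM (what is proved, stated in full; the proofs are below) =====
def Claim_equal_parse_search_query : Prop := ∀ (query : String), Dom_parse_search_query query → Spec_parse_search_query query (parse_search_query query)

-- ===== LEMMAS AND PROOFS =====

-- the cleaning map A applies to each character
def pvClean (ch : Char) : Char :=
  if PySem.Chars.isalnum ch || PySem.Chars.isspace ch then ch else ' '

theorem pv_words_foldl (cs : List Char) (w : List Char) :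
    cs.foldl (fun w ch =>
      if PySem.Chars.isalnum ch || PySem.Chars.isspace ch then w ++ [ch] else w ++ [' ']) w
      = w ++ cs.map pvClean := by
  induction cs generalizing w with
  | nil => simp
  | cons c rest ih =>
    rw [List.foldl_cons, ih]
    by_cases h : (PySem.Chars.isalnum c || PySem.Chars.isspace c) = true <;>
      simp [pvClean, h]

theorem pv_alnum_not_space (c : Char) (h : PySem.Chars.isalnum c = true) :
    PySem.Chars.isspace c = false := by
  simp only [PySem.Chars.isalnum, PySem.Chars.isalpha, PySem.Chars.isdigit,
    PySem.Chars.isupper, PySem.Chars.islower, PySem.Chars.isspace, Char.le_def,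
    Bool.or_eq_true, Bool.and_eq_true, decide_eq_true_eq, Bool.or_eq_false_iff,
    Bool.and_eq_false_iff, decide_eq_false_iff_not, not_le] at *
  have h0 : ('0' : Char).toNat = 48 := by decide
  have h9 : ('9' : Char).toNat = 57 := by decide
  have hA : ('A' : Char).toNat = 65 := by decide
  have hZ : ('Z' : Char).toNat = 90 := by decide
  have ha : ('a' : Char).toNat = 97 := by decide
  have hz : ('z' : Char).toNat = 122 := by decide
  rcases h with (⟨h1, h2⟩ | ⟨h1, h2⟩) | ⟨h1, h2⟩ <;>
    · have t1 := (UInt32.le_iff_toNat_le).mp h1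
      have t2 := (UInt32.le_iff_toNat_le).mp h2
      simp only [Char.toNat] at *
      omega

-- accumulator lemma: split₀.go only conses onto acc and reverses it at the end
theorem pv_go_acc (cs : List Char) (cur : List Char) (acc : List (List Char)) :
    PySem.Chars.split₀.go cs cur acc = acc.reverse ++ PySem.Chars.split₀.go cs cur [] := by
  induction cs generalizing cur acc with
  | nil =>
    simp only [PySem.Chars.split₀.go]
    split_ifs <;> simp
  | cons c rest ih =>
    simp only [PySem.Chars.split₀.go]
    split_ifs with hs he
    · rw [ih [] acc, ih [] []]
    · rw [ih [] (cur.reverse :: acc), ih [] [cur.reverse]]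
      simp
    · exact ih (c :: cur) acc

-- a flushed character (non-alphanumeric) is mapped by pvClean to a whitespace character
theorem pv_clean_space (c : Char) (ha : PySem.Chars.isalnum c = false) :
    PySem.Chars.isspace (pvClean c) = true := by
  unfold pvClean
  by_cases hs : PySem.Chars.isspace c = true
  · simp [hs]
  · simp [ha, hs]
    decide

-- a kept character (alphanumeric) is left unchanged by pvClean
theorem pv_clean_alnum (c : Char) (ha : PySem.Chars.isalnum c = true) :
    pvClean c = c := by
  unfold pvClean
  simp [ha]

-- main invariant: B's fold+flush equals A's split of the cleaned characters
theorem pv_main (cs : List Char) (out : List String) (buf : List Char) :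
    (if (cs.foldl pvAltStep (out, buf)).2.isEmpty then (cs.foldl pvAltStep (out, buf)).1
     else (cs.foldl pvAltStep (out, buf)).1 ++ [String.ofList (cs.foldl pvAltStep (out, buf)).2])
      = out ++ (PySem.Chars.split₀.go (cs.map pvClean) buf.reverse []).map String.ofList := by
  induction cs generalizing out buf with
  | nil =>
    simp only [List.foldl_nil, List.map_nil, PySem.Chars.split₀.go, List.isEmpty_reverse]
    by_cases hb : buf.isEmpty
    · simp [hb]
    · simp [hb]
  | cons c rest ih =>
    rw [List.foldl_cons, List.map_cons]
    by_cases ha : PySem.Chars.isalnum c = true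
    · have hs := pv_alnum_not_space c ha
      have hstep : pvAltStep (out, buf) c = (out, buf ++ [c]) := by
        simp [pvAltStep, ha]
      rw [hstep, ih out (buf ++ [c]), pv_clean_alnum c ha]
      simp only [PySem.Chars.split₀.go, hs, Bool.false_eq_true, if_false]
      simp
    · have ha' : PySem.Chars.isalnum c = false := by simp [ha]
      have hclean := pv_clean_space c ha'
      simp only [PySem.Chars.split₀.go, hclean, if_true, List.isEmpty_reverse]
      by_cases hb : buf.isEmpty
      · have hbnil : buf = [] := List.isEmpty_iff.mp hb
        have hstep : pvAltStep (out, buf) c = (out, buf) := by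
          simp [pvAltStep, ha', hb]
        rw [hstep, ih out buf, hbnil]
        simp
      · have hstep : pvAltStep (out, buf) c = (out ++ [String.ofList buf], []) := by
          simp [pvAltStep, ha', hb]
        rw [hstep, ih (out ++ [String.ofList buf]) []]
        rw [pv_go_acc (rest.map pvClean) [] [buf.reverse.reverse]]
        simp [hb]

-- ===== VERDICT (by name: the statement is the Claim_ definition above) =====
theorem parse_search_query_spec : Claim_equal_parse_search_query := by
  intro query _
  unfold Spec_parse_search_query
  simp only [parse_search_query, parse_search_query_alt]
  rw [pv_words_foldl]
  have h := pv_main (PySem.Str.lower query).toList [] []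
  simp only [List.reverse_nil, List.nil_append] at h
  rw [h]
  simp [PySem.Str.split₀, PySem.Chars.split₀]
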